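-- pv_equiv track=rewrite | github.com/barbaralam/mimicpe | notebooks/extract_pathology.py | get_pathology_confidence
-- ===== SOURCE A (Python) =====
-- def get_pathology_confidence(outputs, pathology):
--     """Parse out pathology/confidence for a single pathology.
--             - if not present, assume 'absent'
--             - if there are multiple extracted entries, take priority
--                 on 'present'/'absent' ones.
--     """
--     pred = []
--     for output in outputs:
--         l = list(filter(lambda x: x['pathology']==pathology, output))
--         if len(l) == 0:
--             x = {'reference': '', 'pathology': pathology, 'confidence': 'missing',}
--         elif len(l) == 1:
--             x = l[0]
--         else:
--             confidences = [x['confidence'] for x in l]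
--             if 'present' in confidences:
--                 x = l[confidences.index('present')]
--             elif 'absent' in confidences:
--                 x = l[confidences.index('absent')]
--             else:
--                 x = l[0]
--         pred.append(x)
--     confidences = [x['confidence'] for x in pred]
--     return confidences
-- ===== SOURCE B (Python) =====
-- def get_pathology_confidence(outputs, pathology):
--     res = []
--     for output in outputs:
--         saw_present = False
--         saw_absent = False
--         first = None
--         for d in output:
--             if d['pathology'] == pathology:
--                 c = d['confidence']
--                 if c == 'present':
--                     saw_present = True
--                 elif c == 'absent':
--                     saw_absent = True
--                 if first is None:
--                     first = c
--         if saw_present: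
--             res.append('present')
--         elif saw_absent:
--             res.append('absent')
--         elif first is not None:
--             res.append(first)
--         else:
--             res.append('missing')
--     return res
-- ===== Notes on version B (the rewrite author's own statement) =====
-- stated objective: simpler
-- what changed: Replaces A's per-output filtered list, confidence list, list.index() lookups and sentinel dict by a single direct pass per output that tracks saw-present, saw-absent and the first matching confidence, then emits the confidence string directly.
import Mathlib
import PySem

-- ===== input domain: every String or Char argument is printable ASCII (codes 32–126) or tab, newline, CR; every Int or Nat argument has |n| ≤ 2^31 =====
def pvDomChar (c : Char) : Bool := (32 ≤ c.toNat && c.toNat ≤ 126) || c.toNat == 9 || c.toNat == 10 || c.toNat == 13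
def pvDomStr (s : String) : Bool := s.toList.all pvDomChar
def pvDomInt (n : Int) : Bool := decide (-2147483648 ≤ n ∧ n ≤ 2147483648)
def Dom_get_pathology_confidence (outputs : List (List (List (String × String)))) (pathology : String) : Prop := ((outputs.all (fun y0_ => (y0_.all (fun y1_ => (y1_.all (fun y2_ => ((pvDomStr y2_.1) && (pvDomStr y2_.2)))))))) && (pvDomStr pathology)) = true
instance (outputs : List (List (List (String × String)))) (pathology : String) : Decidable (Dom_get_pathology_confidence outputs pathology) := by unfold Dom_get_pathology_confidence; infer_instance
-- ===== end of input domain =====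

-- B replaces A's filter + index() + sentinel-dict machinery by one direct pass per output
-- tracking (saw-present, saw-absent, first matching confidence); objective: simpler.

-- shared primitive: Python's d[k] on an association list (first match), with a default
-- standing in for the KeyError case, which Pre_ excludes.
def pvLookupD (d : List (String × String)) (k dflt : String) : String :=
  ((d.find? (fun p => p.1 == k)).map (·.2)).getD dflt

-- ===== PORT A =====
def pvAFilter (pathology : String) (output : List (List (String × String))) :
    List (List (String × String)) :=
  output.filter (fun x => pvLookupD x "pathology" "" == pathology)

def pvASelect (pathology : String) (output : List (List (String × String))) :
    List (String × String) :=
  let l := pvAFilter pathology output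
  if l.length == 0 then
    [("reference", ""), ("pathology", pathology), ("confidence", "missing")]
  else if l.length == 1 then
    l.getD 0 []
  else
    let confidences := l.map (fun x => pvLookupD x "confidence" "")
    if confidences.contains "present" then
      l.getD ((PySem.List.index? confidences "present").getD 0) []
    else if confidences.contains "absent" then
      l.getD ((PySem.List.index? confidences "absent").getD 0) []
    else
      l.getD 0 []

def get_pathology_confidence (outputs : List (List (List (String × String)))) (pathology : String) : List String :=
  (outputs.foldl (fun pred output => pred ++ [pvASelect pathology output]) []).map
    (fun x => pvLookupD x "confidence" "")

-- ===== PORT B =====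
def pvAltStep (pathology : String) (st : Bool × Bool × Option String)
    (d : List (String × String)) : Bool × Bool × Option String :=
  if pvLookupD d "pathology" "" == pathology then
    let c := pvLookupD d "confidence" ""
    let sawP := if c == "present" then true else st.1
    let sawA := if c == "present" then st.2.1 else if c == "absent" then true else st.2.1
    let first := match st.2.2 with | some f => some f | none => some c
    (sawP, sawA, first)
  else st

def pvAltOne (pathology : String) (output : List (List (String × String))) : String :=
  let st := output.foldl (pvAltStep pathology) (false, false, none)
  if st.1 then "present"
  else if st.2.1 then "absent"
  else match st.2.2 with
    | some f => f
    | none => "missing"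

def get_pathology_confidence_alt (outputs : List (List (List (String × String)))) (pathology : String) : List String :=
  outputs.foldl (fun res output => res ++ [pvAltOne pathology output]) []

-- ===== PRECONDITION & SPEC =====
-- Pre_ excludes exactly the inputs where Python A raises KeyError: an entry without a
-- 'pathology' key, or a matching entry without a 'confidence' key.
def Pre_get_pathology_confidence (outputs : List (List (List (String × String)))) (pathology : String) : Prop :=
  ∀ output ∈ outputs, ∀ d ∈ output,
    (d.find? (fun p => p.1 == "pathology")).isSome ∧
    (((d.find? (fun p => p.1 == "pathology")).map (·.2) = some pathology) →
      (d.find? (fun p => p.1 == "confidence")).isSome)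
instance (outputs : List (List (List (String × String)))) (pathology : String) : Decidable (Pre_get_pathology_confidence outputs pathology) := by unfold Pre_get_pathology_confidence; infer_instance

def pvWitness_get_pathology_confidence : (List (List (List (String × String)))) × String :=
  ([[[("pathology", "p"), ("confidence", "present")]], []], "p")

def Spec_get_pathology_confidence (outputs : List (List (List (String × String)))) (pathology : String) (out : List String) : Prop := out = get_pathology_confidence_alt outputs pathology
instance (outputs : List (List (List (String × String)))) (pathology : String) (out : List String) : Decidable (Spec_get_pathology_confidence outputs pathology out) := by unfold Spec_get_pathology_confidence; infer_instance

-- ===== CLAIM (what is proved, stated in full; the proofs are below) =====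
def Claim_equal_get_pathology_confidence : Prop := ∀ (outputs : List (List (List (String × String)))) (pathology : String), Dom_get_pathology_confidence outputs pathology → Pre_get_pathology_confidence outputs pathology → Spec_get_pathology_confidence outputs pathology (get_pathology_confidence outputs pathology)

-- ===== LEMMAS AND PROOFS =====

-- the common per-output value: priority on 'present', then 'absent', then the first match
def pvSpecOne (cs : List String) : String :=
  if cs.contains "present" then "present"
  else if cs.contains "absent" then "absent"
  else cs.headD "missing"

def pvConfs (pathology : String) (output : List (List (String × String))) : List String :=
  (pvAFilter pathology output).map (fun x => pvLookupD x "confidence" "")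

-- picking l[cs.index v] when v ∈ cs = map f l recovers an element whose f-value is v
lemma pv_getD_index_map (f : List (String × String) → String)
    (l : List (List (String × String))) (v : String)
    (h : (l.map f).contains v = true) :
    f (l.getD ((PySem.List.index? (l.map f) v).getD 0) []) = v := by
  induction l with
  | nil => simp at h
  | cons a t ih =>
    by_cases hav : f a = v
    · rw [List.map_cons, hav, PySem.List.index?_cons_self]
      simpa using hav
    · have h' : (t.map f).contains v = true := by
        simp only [List.map_cons, List.contains_cons] at h
        rcases Bool.or_eq_true_iff.mp h with h1 | h1
        · exact absurd (beq_iff_eq.mp h1).symm hav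
        · exact h1
      rw [List.map_cons, PySem.List.index?_cons_of_ne (t.map f) hav]
      obtain ⟨i, hi⟩ := Option.isSome_iff_exists.mp
        ((PySem.List.index?_isSome_iff _ _).mpr (by
          obtain ⟨a', ha', hfa⟩ := by simpa using h'
          exact hfa ▸ (List.mem_map_of_mem ha' : f a' ∈ t.map f)))
      have := ih h'
      rw [hi] at this ⊢
      simpa using this

lemma pv_aselect_conf (pathology : String) (output : List (List (String × String))) :
    pvLookupD (pvASelect pathology output) "confidence" "" =
      pvSpecOne (pvConfs pathology output) := by
  unfold pvASelect pvSpecOne pvConfs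
  rcases hl : pvAFilter pathology output with _ | ⟨d, _ | ⟨d2, t⟩⟩
  · simp [pvLookupD]
  · simp only [List.length_cons, List.length_nil, List.map_cons, List.map_nil]
    by_cases h1 : pvLookupD d "confidence" "" = "present"
    · simp [h1]
    · by_cases h2 : pvLookupD d "confidence" "" = "absent"
      · simp [h2, Ne.symm h1]
      · simp [Ne.symm h1, Ne.symm h2]
  · have hlen0 : (((d :: d2 :: t) : List (List (String × String))).length == 0) = false := by simp
    have hlen1 : (((d :: d2 :: t) : List (List (String × String))).length == 1) = false := by simp
    simp only [hlen0, hlen1, Bool.false_eq_true, if_false]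
    by_cases hp : ((d :: d2 :: t).map (fun x => pvLookupD x "confidence" "")).contains "present" = true
    · rw [if_pos hp, if_pos hp]
      exact pv_getD_index_map (fun x => pvLookupD x "confidence" "") (d :: d2 :: t) "present" hp
    · rw [if_neg hp, if_neg hp]
      by_cases ha : ((d :: d2 :: t).map (fun x => pvLookupD x "confidence" "")).contains "absent" = true
      · rw [if_pos ha, if_pos ha]
        exact pv_getD_index_map (fun x => pvLookupD x "confidence" "") (d :: d2 :: t) "absent" ha
      · rw [if_neg ha, if_neg ha]
        simp

lemma pv_alt_fold (pathology : String) (output : List (List (String × String)))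
    (p a : Bool) (f : Option String) :
    output.foldl (pvAltStep pathology) (p, a, f) =
      (p || (pvConfs pathology output).contains "present",
       a || (pvConfs pathology output).contains "absent",
       match f with
       | some x => some x
       | none => (pvConfs pathology output).head?) := by
  induction output generalizing p a f with
  | nil => simp [pvConfs, pvAFilter]; cases f <;> simp
  | cons d t ih =>
    by_cases hm : (pvLookupD d "pathology" "" == pathology) = true
    · have hc : pvConfs pathology (d :: t) =
          pvLookupD d "confidence" "" :: pvConfs pathology t := by
        simp [pvConfs, pvAFilter, hm]
      rw [List.foldl_cons]
      set c := pvLookupD d "confidence" "" with hcdef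
      have hstep : pvAltStep pathology (p, a, f) d =
          (if c == "present" then true else p,
           if c == "present" then a else if c == "absent" then true else a,
           match f with | some x => some x | none => some c) := by
        simp [pvAltStep, hm, hcdef]
      rw [hstep, ih, hc]
      by_cases h1 : c = "present"
      · cases f <;> simp [h1]
      · by_cases h2 : c = "absent"
        · cases f <;> simp [h2, Ne.symm h1]
        · have h1' : (c == "present") = false := by simp [h1]
          have h2' : (c == "absent") = false := by simp [h2]
          cases f <;> simp [h1', h2', Ne.symm h1, Ne.symm h2]
    · have hc : pvConfs pathology (d :: t) = pvConfs pathology t := by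
        simp only [Bool.not_eq_true] at hm
        simp [pvConfs, pvAFilter, hm]
      rw [List.foldl_cons]
      have hstep : pvAltStep pathology (p, a, f) d = (p, a, f) := by
        simp only [Bool.not_eq_true] at hm
        simp [pvAltStep, hm]
      rw [hstep, ih, hc]

lemma pv_altone_eq (pathology : String) (output : List (List (String × String))) :
    pvAltOne pathology output = pvSpecOne (pvConfs pathology output) := by
  unfold pvAltOne pvSpecOne
  rw [pv_alt_fold]
  cases hc : (pvConfs pathology output) with
  | nil => simp
  | cons x t =>
    by_cases h1 : (x :: t).contains "present" = true
    · simp [h1]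
    · simp only [Bool.not_eq_true] at h1
      by_cases h2 : (x :: t).contains "absent" = true
      · simp [h1, h2]
      · simp only [Bool.not_eq_true] at h2
        simp [h1, h2]

-- ===== VERDICT (by name: the statement is the Claim_ definition above) =====
theorem get_pathology_confidence_spec : Claim_equal_get_pathology_confidence := by
  intro outputs pathology _ _
  unfold Spec_get_pathology_confidence get_pathology_confidence get_pathology_confidence_alt
  rw [PySem.List.foldl_append_singleton_eq_map, PySem.List.foldl_append_singleton_eq_map]
  simp only [List.nil_append, List.map_map]
  apply List.map_congr_left
  intro output hout
  simp only [Function.comp]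
  rw [pv_aselect_conf pathology output, pv_altone_eq]
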